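-- pv_equiv track=rewrite | github.com/BioGeMT/ParaDISM | scripts/reads_2_msa.py | map_insertions_dp
-- ===== SOURCE A (Python) =====
-- from typing import Dict, List, Set, Tuple
--
-- def map_insertions_dp(insertions: List[Tuple], valid_gaps: List[Tuple], max_scenarios: int = 100) -> List[List]:
--     memo = {}
--
--     def dp(i: int, j: int) -> Tuple[int, List]:
--         if i == len(insertions) or j == len(valid_gaps):
--             return (0, [[]])
--
--         if (i, j) in memo:
--             return memo[(i, j)]
--
--         count1, mappings1 = dp(i+1, j)
--         count2, mappings2 = dp(i, j+1)
--
--         insertion_base = insertions[i][1].upper()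
--         gap_valid_bases = valid_gaps[j][1]
--         if insertion_base in gap_valid_bases:
--             count3, mappings3 = dp(i+1, j+1)
--             count3 += 1
--             new_mappings3 = [[(insertions[i][0], valid_gaps[j][0])] + m for m in mappings3]
--         else:
--             count3, new_mappings3 = (0, [])
--
--         max_count = max(count1, count2, count3)
--         mappings = []
--         if count1 == max_count:
--             mappings.extend(mappings1)
--         if count2 == max_count:
--             mappings.extend(mappings2)
--         if count3 == max_count:
--             mappings.extend(new_mappings3)
--
--         if len(mappings) > max_scenarios:
--             mappings = mappings[:max_scenarios]
--
--         memo[(i, j)] = (max_count, mappings)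
--         return memo[(i, j)]
--
--     max_mapped, all_mappings = dp(0, 0)
--
--     unique_mappings = []
--     seen = set()
--     for m in all_mappings[:max_scenarios]:
--         m_sorted = tuple(sorted(m))
--         if m_sorted not in seen:
--             seen.add(m_sorted)
--             unique_mappings.append(m)
--             if len(unique_mappings) >= max_scenarios:
--                 break
--
--     memo.clear()
--     return unique_mappings
-- ===== SOURCE B (Python) =====
-- def map_insertions_dp(insertions, valid_gaps, max_scenarios=100):
--     g = len(valid_gaps)
--
--     def cell(ins, gap, down, right, diag):
--         count1, mappings1 = down
--         count2, mappings2 = right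
--         if ins[1].upper() in gap[1]:
--             c3, m3 = diag
--             count3 = c3 + 1
--             new_mappings3 = [[(ins[0], gap[0])] + m for m in m3]
--         else:
--             count3, new_mappings3 = 0, []
--         best = max(count1, count2, count3)
--         out = []
--         if count1 == best:
--             out.extend(mappings1)
--         if count2 == best:
--             out.extend(mappings2)
--         if count3 == best:
--             out.extend(new_mappings3)
--         if len(out) > max_scenarios:
--             out = out[:max_scenarios]
--         return (best, out)
--
--     # bottom-up: row i holds dp(i, j) for j = 0..g; start at i = n and work upward
--     row = [(0, [[]]) for _ in range(g + 1)]
--     for ins in reversed(insertions):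
--         new_row = [(0, [[]])]
--         for j in range(g - 1, -1, -1):
--             new_row.insert(0, cell(ins, valid_gaps[j], row[j], new_row[0], row[j + 1]))
--         row = new_row
--     all_mappings = row[0][1]
--
--     def uniques():
--         seen = set()
--         k = 0
--         for m in all_mappings[:max_scenarios]:
--             key = tuple(sorted(m))
--             if key in seen:
--                 continue
--             seen.add(key)
--             yield m
--             k += 1
--             if k >= max_scenarios:
--                 return
--     return list(uniques())
-- ===== Notes on version B (the rewrite author's own statement) =====
-- stated objective: alternative
-- what changed: Replaced A's top-down memoized recursion dp(i,j) by an explicit bottom-up table built row by row from the boundary (foldr over insertions, each row built right-to-left from the row below), and A's append-accumulator dedup loop by a front-building generator with an emitted count; the per-cell recurrence and outputs are identical.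
import Mathlib
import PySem

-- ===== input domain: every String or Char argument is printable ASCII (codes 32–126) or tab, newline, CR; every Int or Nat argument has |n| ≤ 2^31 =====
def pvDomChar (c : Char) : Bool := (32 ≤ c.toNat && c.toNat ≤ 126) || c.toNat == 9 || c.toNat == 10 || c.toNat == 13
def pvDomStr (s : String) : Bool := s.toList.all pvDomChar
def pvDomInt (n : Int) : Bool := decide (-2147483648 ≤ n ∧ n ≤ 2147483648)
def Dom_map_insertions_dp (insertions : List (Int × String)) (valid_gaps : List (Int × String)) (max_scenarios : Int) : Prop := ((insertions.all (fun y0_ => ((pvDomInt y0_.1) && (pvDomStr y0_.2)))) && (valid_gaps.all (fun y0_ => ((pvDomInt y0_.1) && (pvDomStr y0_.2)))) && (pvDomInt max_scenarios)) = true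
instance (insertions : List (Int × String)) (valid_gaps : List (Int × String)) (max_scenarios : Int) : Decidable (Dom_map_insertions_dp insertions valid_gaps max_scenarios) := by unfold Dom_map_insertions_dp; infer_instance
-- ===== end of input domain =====

-- B replaces A's memoized top-down recursion by an explicit bottom-up row-by-row table
-- (alternative decomposition, same cell recurrence); return values are proved identical.

-- ===== PORT A =====
-- A's dp(i, j) (the memo cache only speeds dp up; it never changes the value, so the
-- port is the plain recursion).  The '==' tests against len are written as '≥' — dp is
-- only ever called with i ≤ len(insertions), j ≤ len(valid_gaps), where the two agree.
-- The extra fuel argument only makes the recursion structural: map_insertions_dp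
-- supplies fuel > (len insertions - i) + (len valid_gaps - j), so the 0-fuel branch is
-- never reached (dpA_fuel below proves fuel-irrelevance).
def dpA (insertions : List (Int × String)) (valid_gaps : List (Int × String))
    (max_scenarios : Int) : Nat → Nat → Nat → Int × List (List (Int × Int))
  | 0, _, _ => (0, [[]])
  | fuel+1, i, j =>
    if insertions.length ≤ i ∨ valid_gaps.length ≤ j then (0, [[]])
    else
      let r1 := dpA insertions valid_gaps max_scenarios fuel (i+1) j
      let r2 := dpA insertions valid_gaps max_scenarios fuel i (j+1)
      let insertion_base := PySem.Str.upper ((insertions.getD i (0, "")).2)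
      let gap_valid_bases := (valid_gaps.getD j (0, "")).2
      let r3 :=
        if PySem.Str.isIn insertion_base gap_valid_bases then
          let r := dpA insertions valid_gaps max_scenarios fuel (i+1) (j+1)
          (r.1 + 1, r.2.map (fun m => [((insertions.getD i (0, "")).1, (valid_gaps.getD j (0, "")).1)] ++ m))
        else ((0 : Int), ([] : List (List (Int × Int))))
      let max_count := max (max r1.1 r2.1) r3.1
      let mappings :=
        (if r1.1 = max_count then r1.2 else []) ++
        (if r2.1 = max_count then r2.2 else []) ++
        (if r3.1 = max_count then r3.2 else [])
      let mappings :=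
        if (mappings.length : Int) > max_scenarios then
          PySem.List.slice mappings none (some max_scenarios)
        else mappings
      (max_count, mappings)

-- A's final for-loop: seen-set dedup with append accumulator and break on len ≥ max_scenarios
def dedupA (max_scenarios : Int) : List (List (Int × Int)) → PySem.Set (List (Int × Int)) →
    List (List (Int × Int)) → List (List (Int × Int))
  | [], _, acc => acc
  | m :: rest, seen, acc =>
    let m_sorted := PySem.List.sorted2 m (fun p => p.1) (fun p => p.2)
    if PySem.Set.contains seen m_sorted then dedupA max_scenarios rest seen acc
    else
      let acc' := acc ++ [m]
      if (acc'.length : Int) ≥ max_scenarios then acc'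
      else dedupA max_scenarios rest (PySem.Set.add seen m_sorted) acc'

def map_insertions_dp (insertions : List (Int × String)) (valid_gaps : List (Int × String)) (max_scenarios : Int) : List (List (Int × Int)) :=
  let r := dpA insertions valid_gaps max_scenarios (insertions.length + valid_gaps.length + 1) 0 0
  dedupA max_scenarios (PySem.List.slice r.2 none (some max_scenarios)) PySem.Set.empty []

-- ===== PORT B =====
-- one table cell from its three neighbours (Source B's `cell`)
def cellB (max_scenarios : Int) (ins gap : Int × String)
    (down right diag : Int × List (List (Int × Int))) : Int × List (List (Int × Int)) :=
  let r3 :=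
    if PySem.Str.isIn (PySem.Str.upper ins.2) gap.2 then
      (diag.1 + 1, diag.2.map (fun m => [(ins.1, gap.1)] ++ m))
    else ((0 : Int), ([] : List (List (Int × Int))))
  let best := max (max down.1 right.1) r3.1
  let out :=
    (if down.1 = best then down.2 else []) ++
    (if right.1 = best then right.2 else []) ++
    (if r3.1 = best then r3.2 else [])
  let out :=
    if (out.length : Int) > max_scenarios then
      PySem.List.slice out none (some max_scenarios)
    else out
  (best, out)

-- build row i right-to-left from row i+1 (Source B's inner j-loop)
def rowB (max_scenarios : Int) (ins : Int × String) :
    List (Int × String) → List (Int × List (List (Int × Int))) → List (Int × List (List (Int × Int)))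
  | [], _ => [(0, [[]])]
  | gap :: gaps', below =>
    let tail := rowB max_scenarios ins gaps' below.tail
    cellB max_scenarios ins gap (below.headD (0, [[]])) (tail.headD (0, [[]]))
      (below.tail.headD (0, [[]])) :: tail

-- Source B's `uniques` generator: front-building dedup with an emitted-count parameter
def dedupB (max_scenarios : Int) (k : Int) (seen : PySem.Set (List (Int × Int))) :
    List (List (Int × Int)) → List (List (Int × Int))
  | [] => []
  | m :: rest =>
    let key := PySem.List.sorted2 m (fun p => p.1) (fun p => p.2)
    if PySem.Set.contains seen key then dedupB max_scenarios k seen rest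
    else m :: (if k + 1 ≥ max_scenarios then []
               else dedupB max_scenarios (k + 1) (PySem.Set.add seen key) rest)

def map_insertions_dp_alt (insertions : List (Int × String)) (valid_gaps : List (Int × String)) (max_scenarios : Int) : List (List (Int × Int)) :=
  let base : List (Int × List (List (Int × Int))) := List.replicate (valid_gaps.length + 1) (0, [[]])
  let row := insertions.foldr (fun x r => rowB max_scenarios x valid_gaps r) base
  let all_mappings := (row.headD (0, [[]])).2
  dedupB max_scenarios 0 PySem.Set.empty (PySem.List.slice all_mappings none (some max_scenarios))

-- ===== PRECONDITION & SPEC =====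
def Spec_map_insertions_dp (insertions : List (Int × String)) (valid_gaps : List (Int × String)) (max_scenarios : Int) (out : List (List (Int × Int))) : Prop := out = map_insertions_dp_alt insertions valid_gaps max_scenarios
instance (insertions : List (Int × String)) (valid_gaps : List (Int × String)) (max_scenarios : Int) (out : List (List (Int × Int))) : Decidable (Spec_map_insertions_dp insertions valid_gaps max_scenarios out) := by unfold Spec_map_insertions_dp; infer_instance

-- ===== CLAIM (what is proved, stated in full; the proofs are below) =====
def Claim_equal_map_insertions_dp : Prop := ∀ (insertions : List (Int × String)) (valid_gaps : List (Int × String)) (max_scenarios : Int), Dom_map_insertions_dp insertions valid_gaps max_scenarios → Spec_map_insertions_dp insertions valid_gaps max_scenarios (map_insertions_dp insertions valid_gaps max_scenarios)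

-- ===== LEMMAS AND PROOFS =====

-- the fuel argument is irrelevant once it dominates the recursion depth
lemma dpA_fuel (ins gaps : List (Int × String)) (ms : Int) :
    ∀ (f1 f2 i j : Nat), (ins.length - i) + (gaps.length - j) < f1 →
      (ins.length - i) + (gaps.length - j) < f2 →
      dpA ins gaps ms f1 i j = dpA ins gaps ms f2 i j := by
  intro f1
  induction f1 with
  | zero => intro f2 i j h1 h2; omega
  | succ f1 ih =>
    intro f2 i j h1 h2
    obtain ⟨f2', rfl⟩ : ∃ k, f2 = k + 1 := ⟨f2 - 1, by omega⟩
    simp only [dpA]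
    by_cases hb : ins.length ≤ i ∨ gaps.length ≤ j
    · rw [if_pos hb, if_pos hb]
    · rw [if_neg hb, if_neg hb]
      rw [ih f2' (i+1) j (by omega) (by omega),
          ih f2' i (j+1) (by omega) (by omega),
          ih f2' (i+1) (j+1) (by omega) (by omega)]

-- dp(i, j) with its canonical (just sufficient) fuel
def dpVal (ins gaps : List (Int × String)) (ms : Int) (i j : Nat) : Int × List (List (Int × Int)) :=
  dpA ins gaps ms ((ins.length - i) + (gaps.length - j) + 1) i j

-- one-step unfolding of dpA at positive fuel
lemma dpA_succ_boundary (ins gaps : List (Int × String)) (ms : Int) (fuel i j : Nat)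
    (h : ins.length ≤ i ∨ gaps.length ≤ j) :
    dpA ins gaps ms (fuel+1) i j = (0, [[]]) := by
  simp only [dpA]
  rw [if_pos h]

lemma dpA_succ_step (ins gaps : List (Int × String)) (ms : Int) (fuel i j : Nat)
    (hi : i < ins.length) (hj : j < gaps.length) :
    dpA ins gaps ms (fuel+1) i j =
      cellB ms (ins.getD i (0, "")) (gaps.getD j (0, "")) (dpA ins gaps ms fuel (i+1) j)
        (dpA ins gaps ms fuel i (j+1)) (dpA ins gaps ms fuel (i+1) (j+1)) := by
  simp only [dpA]
  rw [if_neg (by omega)]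
  simp only [cellB]

-- boundary cells
lemma dpA_boundary (ins gaps : List (Int × String)) (ms : Int) (i j : Nat)
    (h : ins.length ≤ i ∨ gaps.length ≤ j) :
    dpVal ins gaps ms i j = (0, [[]]) := by
  have hL : dpVal ins gaps ms i j
      = dpA ins gaps ms (((ins.length - i) + (gaps.length - j)) + 1) i j := rfl
  rw [hL, dpA_succ_boundary ins gaps ms _ i j h]

-- interior cell of A IS B's cell recurrence on A's three recursive values
lemma dpA_step (ins gaps : List (Int × String)) (ms : Int) (i j : Nat)
    (hi : i < ins.length) (hj : j < gaps.length) :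
    dpVal ins gaps ms i j =
      cellB ms (ins.getD i (0, "")) (gaps.getD j (0, "")) (dpVal ins gaps ms (i+1) j)
        (dpVal ins gaps ms i (j+1)) (dpVal ins gaps ms (i+1) (j+1)) := by
  have hL : dpVal ins gaps ms i j
      = dpA ins gaps ms (((ins.length - i) + (gaps.length - j)) + 1) i j := rfl
  have e1 : dpA ins gaps ms ((ins.length - i) + (gaps.length - j)) (i+1) j
      = dpVal ins gaps ms (i+1) j := by
    rw [dpA_fuel ins gaps ms _ ((ins.length - (i+1)) + (gaps.length - j) + 1) (i+1) j
      (by omega) (by omega)]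
    rfl
  have e2 : dpA ins gaps ms ((ins.length - i) + (gaps.length - j)) i (j+1)
      = dpVal ins gaps ms i (j+1) := by
    rw [dpA_fuel ins gaps ms _ ((ins.length - i) + (gaps.length - (j+1)) + 1) i (j+1)
      (by omega) (by omega)]
    rfl
  have e3 : dpA ins gaps ms ((ins.length - i) + (gaps.length - j)) (i+1) (j+1)
      = dpVal ins gaps ms (i+1) (j+1) := by
    rw [dpA_fuel ins gaps ms _ ((ins.length - (i+1)) + (gaps.length - (j+1)) + 1) (i+1) (j+1)
      (by omega) (by omega)]
    rfl
  rw [hL, dpA_succ_step ins gaps ms _ i j hi hj, e1, e2, e3]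

-- B's row builder computes a full row of dp values
lemma rowB_spec (ins gaps : List (Int × String)) (ms : Int) (i : Nat) (hi : i < ins.length) :
    ∀ (j : Nat), j ≤ gaps.length →
      rowB ms ins[i] (gaps.drop j)
        ((List.range' j (gaps.length + 1 - j)).map (fun t => dpVal ins gaps ms (i+1) t))
      = (List.range' j (gaps.length + 1 - j)).map (fun t => dpVal ins gaps ms i t) := by
  intro j hj
  induction hd : gaps.length - j generalizing j with
  | zero =>
    have hje : j = gaps.length := by omega
    subst hje
    have h1 : gaps.length + 1 - gaps.length = 1 := by omega
    simp only [h1, List.drop_length, List.range'_one, List.map_cons, List.map_nil, rowB]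
    rw [dpA_boundary ins gaps ms i gaps.length (Or.inr le_rfl)]
  | succ d ih =>
    have hjlt : j < gaps.length := by omega
    have hdrop : gaps.drop j = gaps[j] :: gaps.drop (j+1) := List.drop_eq_getElem_cons hjlt
    have hlen : gaps.length + 1 - j = (gaps.length + 1 - (j+1)) + 1 := by omega
    have hrange : List.range' j (gaps.length + 1 - j)
        = j :: List.range' (j+1) (gaps.length + 1 - (j+1)) := by
      rw [hlen, List.range'_succ]
    have hlen2 : gaps.length + 1 - (j+1) = (gaps.length + 1 - (j+2)) + 1 := by omega
    have hrange2 : List.range' (j+1) (gaps.length + 1 - (j+1))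
        = (j+1) :: List.range' (j+2) (gaps.length + 1 - (j+2)) := by
      rw [hlen2, List.range'_succ]
    have hih := ih (j+1) (by omega) (by omega)
    rw [hdrop, hrange]
    simp only [List.map_cons, rowB, List.tail_cons]
    rw [hih]
    rw [hrange2]
    simp only [List.map_cons, List.headD_cons]
    rw [← List.getD_eq_getElem ins (0, "") hi, ← List.getD_eq_getElem gaps (0, "") hjlt,
        ← dpA_step ins gaps ms i j hi hjlt]

-- the foldr over the insertion suffix computes row i of the dp table
lemma rows_spec (ins gaps : List (Int × String)) (ms : Int) :
    ∀ (l : List (Int × String)) (i : Nat), i ≤ ins.length → ins.drop i = l →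
      (l.foldr (fun x r => rowB ms x gaps r) (List.replicate (gaps.length + 1) (0, [[]])))
      = (List.range' 0 (gaps.length + 1)).map (fun t => dpVal ins gaps ms i t) := by
  intro l
  induction l with
  | nil =>
    intro i hile hdrop
    have hi : i = ins.length := by
      have := List.drop_eq_nil_iff.mp hdrop
      omega
    subst hi
    rw [List.map_congr_left (fun t ht =>
      dpA_boundary ins gaps ms ins.length t (Or.inl le_rfl))]
    simp [List.map_const', List.length_range']
  | cons x l' ih =>
    intro i hile hdrop
    have hilt : i < ins.length := by
      by_contra h
      rw [List.drop_eq_nil_iff.mpr (by omega)] at hdrop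
      exact List.cons_ne_nil x l' hdrop.symm
    have hcons : ins.drop i = ins[i] :: ins.drop (i+1) := List.drop_eq_getElem_cons hilt
    rw [hdrop] at hcons
    obtain ⟨hx, hrest⟩ := List.cons.inj hcons
    subst hx
    simp only [List.foldr_cons]
    rw [ih (i+1) (by omega) hrest.symm]
    have := rowB_spec ins gaps ms i hilt 0 (Nat.zero_le _)
    simpa using this

-- the two dedup loops agree
lemma dedup_eq (ms : Int) : ∀ (xs : List (List (Int × Int))) (seen : PySem.Set (List (Int × Int)))
    (acc : List (List (Int × Int))),
    dedupA ms xs seen acc = acc ++ dedupB ms (acc.length : Int) seen xs := by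
  intro xs
  induction xs with
  | nil => intro seen acc; simp [dedupA, dedupB]
  | cons m rest ih =>
    intro seen acc
    simp only [dedupA, dedupB]
    by_cases hc : PySem.Set.contains seen
        (PySem.List.sorted2 m (fun p => p.1) (fun p => p.2)) = true
    · simp only [hc, if_true]
      exact ih seen acc
    · simp only [Bool.not_eq_true] at hc
      simp only [hc, Bool.false_eq_true, if_false]
      have hl : (((acc ++ [m]).length : Int)) = (acc.length : Int) + 1 := by
        simp [List.length_append]
      rw [hl]
      by_cases hb : (acc.length : Int) + 1 ≥ ms
      · simp [hb]
      · simp only [hb, if_false]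
        rw [ih _ (acc ++ [m]), hl]
        simp

-- ===== VERDICT (by name: the statement is the Claim_ definition above) =====
theorem map_insertions_dp_spec : Claim_equal_map_insertions_dp := by
  unfold Claim_equal_map_insertions_dp
  intro ins gaps ms _
  unfold Spec_map_insertions_dp map_insertions_dp map_insertions_dp_alt
  show dedupA ms (PySem.List.slice (dpA ins gaps ms (ins.length + gaps.length + 1) 0 0).2 none (some ms)) PySem.Set.empty []
      = dedupB ms 0 PySem.Set.empty (PySem.List.slice
          ((List.foldr (fun x r => rowB ms x gaps r)
            (List.replicate (gaps.length + 1) (0, [[]])) ins).headD (0, [[]])).2 none (some ms))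
  rw [rows_spec ins gaps ms ins 0 (Nat.zero_le _) List.drop_zero]
  have hfuel : dpA ins gaps ms (ins.length + gaps.length + 1) 0 0 = dpVal ins gaps ms 0 0 := by
    rw [dpA_fuel ins gaps ms (ins.length + gaps.length + 1)
      (((ins.length - 0) + (gaps.length - 0)) + 1) 0 0 (by omega) (by omega)]
    rfl
  rw [hfuel]
  have hr : List.range' 0 (gaps.length + 1) = 0 :: List.range' 1 gaps.length := by
    rw [List.range'_succ]
  rw [hr]
  simp only [List.map_cons, List.headD_cons]
  rw [dedup_eq]
  simp
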